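-- pv_equiv track=rewrite | github.com/brenbrenbrenbren/volcano-tool | plotting/upset.py | _calculate_intersections
-- ===== SOURCE A (Python) =====
-- from typing import Dict, Set, List, Tuple, Optional
--
-- def _calculate_intersections(deg_sets: Dict[str, Set[str]]) -> Dict[Tuple[str, ...], Set[str]]:
--     """
--     Calculate all possible intersections between sets.
--
--     Returns exclusive intersections (genes in exactly these sets and no others).
--     """
--     dataset_names = list(deg_sets.keys())
--     all_genes = set.union(*deg_sets.values()) if deg_sets else set()
--
--     # For each gene, find which sets it belongs to
--     gene_membership = {}
--     for gene in all_genes: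
--         members = tuple(sorted([name for name, genes in deg_sets.items() if gene in genes]))
--         if members not in gene_membership:
--             gene_membership[members] = set()
--         gene_membership[members].add(gene)
--
--     return gene_membership
-- ===== SOURCE B (Python) =====
-- def _calculate_intersections(deg_sets):
--     """
--     Calculate all possible intersections between sets.
--
--     Returns exclusive intersections (genes in exactly these sets and no others).
--
--     One pass over every set's elements builds gene -> list of containing set
--     names; a second pass groups genes by their sorted membership tuple.
--     (No per-gene scan of all datasets.)
--     """
--     membership = {}
--     for name, genes in deg_sets.items():
--         for gene in genes:
--             membership.setdefault(gene, []).append(name)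
--     result = {}
--     for gene, names in membership.items():
--         key = tuple(sorted(names))
--         result.setdefault(key, set()).add(gene)
--     return result
-- ===== Notes on version B (the rewrite author's own statement) =====
-- stated objective: faster
-- what changed: Instead of testing every gene of the union against every dataset (a membership scan per gene per dataset), B sweeps each dataset's genes once to build a gene->containing-names index and then groups genes by their sorted name tuple.
import Mathlib
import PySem

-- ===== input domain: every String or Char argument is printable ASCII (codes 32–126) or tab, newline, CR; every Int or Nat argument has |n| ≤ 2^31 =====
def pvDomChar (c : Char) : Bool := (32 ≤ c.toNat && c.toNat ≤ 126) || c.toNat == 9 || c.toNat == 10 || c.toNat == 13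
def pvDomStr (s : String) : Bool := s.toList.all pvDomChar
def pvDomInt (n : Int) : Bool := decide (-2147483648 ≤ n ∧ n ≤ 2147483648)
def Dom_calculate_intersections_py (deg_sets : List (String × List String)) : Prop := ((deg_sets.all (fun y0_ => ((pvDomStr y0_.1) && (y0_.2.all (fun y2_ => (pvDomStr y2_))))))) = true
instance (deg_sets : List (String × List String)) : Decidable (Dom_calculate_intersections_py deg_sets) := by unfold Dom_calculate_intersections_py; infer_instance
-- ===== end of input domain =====

-- B replaces A's per-gene scan over all datasets by one sweep over each dataset's genes
-- building a gene -> containing-set-names index, then groups genes by sorted name tuple (faster in a timing run).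


-- ===== PORT A =====
def calculate_intersections_py (deg_sets : List (String × List String)) : List (List String × List String) :=
  let _dataset_names := deg_sets.map (fun p => p.1)
  let all_genes : PySem.Set String :=
    if deg_sets = [] then PySem.Set.empty
    else (deg_sets.map (fun p => p.2)).foldl (fun s gs => PySem.Set.union s gs) PySem.Set.empty
  let gene_membership : PySem.Dict (List String) (PySem.Set String) :=
    all_genes.foldl (fun gm gene =>
      let members := PySem.List.sorted (deg_sets.filterMap (fun p => if gene ∈ p.2 then some p.1 else none)) (fun x => x) false
      let gm := if gm.contains members then gm else gm.insert members PySem.Set.empty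
      gm.modify members PySem.Set.empty (fun s => PySem.Set.add s gene)) PySem.Dict.empty
  gene_membership.items

-- ===== PORT B =====
def calculate_intersections_py_alt (deg_sets : List (String × List String)) : List (List String × List String) :=
  let membership : PySem.Dict String (List String) :=
    deg_sets.foldl (fun m p =>
      p.2.foldl (fun m g => m.modify g [] (fun ns => ns ++ [p.1])) m) PySem.Dict.empty
  let result : PySem.Dict (List String) (PySem.Set String) :=
    membership.items.foldl (fun r q =>
      r.modify (PySem.List.sorted q.2 (fun x => x) false) PySem.Set.empty
        (fun s => PySem.Set.add s q.1)) PySem.Dict.empty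
  result.items

-- ===== PRECONDITION & SPEC =====
-- Pre_ excludes only value lists with duplicate elements: they do not represent Python sets
-- (A's parameter type is Dict[str, Set[str]]), so they correspond to no input of the Python programs.
def Pre_calculate_intersections_py (deg_sets : List (String × List String)) : Prop :=
  ∀ p ∈ deg_sets, p.2.Nodup
instance (deg_sets : List (String × List String)) : Decidable (Pre_calculate_intersections_py deg_sets) := by unfold Pre_calculate_intersections_py; infer_instance
def pvWitness_calculate_intersections_py : (List (String × List String)) :=
  [("up", ["g1", "g2"]), ("down", ["g2", "g3"])]
def Spec_calculate_intersections_py (deg_sets : List (String × List String)) (out : List (List String × List String)) : Prop := out = calculate_intersections_py_alt deg_sets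
instance (deg_sets : List (String × List String)) (out : List (List String × List String)) : Decidable (Spec_calculate_intersections_py deg_sets out) := by unfold Spec_calculate_intersections_py; infer_instance

-- ===== CLAIM (what is proved, stated in full; the proofs are below) =====
def Claim_equal_calculate_intersections_py : Prop := ∀ (deg_sets : List (String × List String)), Dom_calculate_intersections_py deg_sets → Pre_calculate_intersections_py deg_sets → Spec_calculate_intersections_py deg_sets (calculate_intersections_py deg_sets)

-- ===== LEMMAS AND PROOFS =====

-- names of the datasets containing `g`, in dataset order (the value B's index stores per gene)
def pvNames (l : List (String × List String)) (g : String) : List String :=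
  l.filterMap (fun p => if g ∈ p.2 then some p.1 else none)
theorem pv_modify_eq (d : PySem.Dict (List String) (PySem.Set String)) (k : List String)
    (f : PySem.Set String → PySem.Set String) :
    (if d.contains k then d else d.insert k PySem.Set.empty).modify k PySem.Set.empty f
      = d.modify k PySem.Set.empty f := by
  by_cases h : d.contains k
  · simp [h]
  · simp only [h, if_neg, Bool.not_eq_true]
    simp only [PySem.Dict.modify]
    rw [PySem.Dict.getD_insert_self, PySem.Dict.getD_of_not_contains d _ (by simp [h])]
    have hc : (d.insert k PySem.Set.empty).contains k = true := PySem.Dict.contains_insert_self d k _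
    have hno : ∀ p ∈ d.items, ¬ (p.1 == k) = true := by
      intro p hp hbeq
      apply h; simp only [PySem.Dict.contains]; exact List.any_eq_true.2 ⟨p, hp, hbeq⟩
    apply PySem.Dict.ext
    rw [PySem.Dict.items_insert_of_contains _ _ hc,
        PySem.Dict.items_insert_of_not_contains _ _ (by simp [h]),
        PySem.Dict.items_insert_of_not_contains _ _ (by simp [h])]
    rw [List.map_append, List.map_congr_left (fun p hp => if_neg (hno p hp))]
    simp

theorem pv_contains_iff (m : PySem.Dict String (List String)) (s : PySem.Set String)
    (F : String → List String) (hm : m.items = s.map (fun g => (g, F g))) (x : String) :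
    m.contains x = true ↔ x ∈ s := by
  simp [PySem.Dict.contains, hm, List.any_eq_true]

theorem pv_inner (n : String) :
    ∀ (gs : List String), gs.Nodup →
    ∀ (m : PySem.Dict String (List String)) (s : PySem.Set String) (F : String → List String),
    s.Nodup →
    m.items = s.map (fun g => (g, F g)) →
    (∀ g, g ∉ s → F g = []) →
    (gs.foldl (fun m g => m.modify g [] (fun ns => ns ++ [n])) m).items
      = (PySem.Set.update s gs).map
          (fun g => (g, F g ++ (if g ∈ gs then [n] else []))) := by
  intro gs
  induction gs with
  | nil =>
    intro _ m s F _ hm _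
    simpa [PySem.Set.update] using hm
  | cons g rest ih =>
    intro hnd m s F hs hm hF
    have hgrest : g ∉ rest := (List.nodup_cons.1 hnd).1
    have hndr : rest.Nodup := (List.nodup_cons.1 hnd).2
    set F1 : String → List String := fun x => if x = g then F x ++ [n] else F x with hF1def
    have hm1 : (m.modify g [] (fun ns => ns ++ [n])).items
        = (PySem.Set.add s g).map (fun x => (x, F1 x)) := by
      by_cases hg : g ∈ s
      · have hcon : m.contains g = true := (pv_contains_iff m s F hm g).2 hg
        have hkeys : m.keys.Nodup := by
          simpa [PySem.Dict.keys, hm, List.map_map, Function.comp_def] using hs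
        have hgd : m.getD g [] = F g :=
          PySem.Dict.getD_of_mem_items m (by rw [hm]; exact List.mem_map_of_mem hg) hkeys []
        rw [PySem.Dict.modify, hgd, PySem.Dict.items_insert_of_contains _ _ hcon, hm]
        rw [PySem.Set.add, if_pos (by simpa using hg)]
        rw [List.map_map]
        apply List.map_congr_left
        intro x _
        by_cases hx : x = g
        · subst hx; simp [hF1def]
        · simp [hF1def, hx]
      · have hcon : m.contains g = false := by
          cases hcon' : m.contains g
          · rfl
          · exact absurd ((pv_contains_iff m s F hm g).1 hcon') hg
        rw [PySem.Dict.modify, PySem.Dict.getD_of_not_contains m _ hcon,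
            PySem.Dict.items_insert_of_not_contains _ _ hcon, hm]
        rw [PySem.Set.add, if_neg (by simpa using hg)]
        rw [List.map_append]
        congr 1
        · apply List.map_congr_left
          intro x hx
          have : x ≠ g := fun hc => hg (hc ▸ hx)
          simp [hF1def, this]
        · simp [hF1def, hF g hg]
    have hs1 : (PySem.Set.add s g).Nodup := PySem.Set.nodup_add s g hs
    have hF1 : ∀ x, x ∉ PySem.Set.add s g → F1 x = [] := by
      intro x hx
      rw [PySem.Set.mem_add] at hx
      push Not at hx
      simp [hF1def, hx.2, hF x hx.1]
    have := ih hndr (m.modify g [] (fun ns => ns ++ [n])) (PySem.Set.add s g) F1 hs1 hm1 hF1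
    rw [List.foldl_cons, this]
    have hupd : PySem.Set.update s (g :: rest) = PySem.Set.update (PySem.Set.add s g) rest := rfl
    rw [← hupd]
    apply List.map_congr_left
    intro x _
    by_cases hx : x = g
    · subst hx; simp [hF1def, hgrest]
    · simp [hF1def, hx]

theorem pv_outer :
    ∀ (l : List (String × List String)), (∀ p ∈ l, p.2.Nodup) →
    ∀ (m : PySem.Dict String (List String)) (s : PySem.Set String) (F : String → List String),
    s.Nodup →
    m.items = s.map (fun g => (g, F g)) →
    (∀ g, g ∉ s → F g = []) →
    (l.foldl (fun m p => p.2.foldl (fun m g => m.modify g [] (fun ns => ns ++ [p.1])) m) m).items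
      = (l.foldl (fun s p => PySem.Set.union s p.2) s).map (fun g => (g, F g ++ pvNames l g)) := by
  intro l
  induction l with
  | nil =>
    intro _ m s F _ hm _
    simpa [pvNames] using hm
  | cons p t ih =>
    intro hnd m s F hs hm hF
    have hm1 := pv_inner p.1 p.2 (hnd p (List.mem_cons_self)) m s F hs hm hF
    have hs1 : (PySem.Set.update s p.2).Nodup := PySem.Set.nodup_update s p.2 hs
    have hF1 : ∀ g, g ∉ PySem.Set.update s p.2 →
        (F g ++ (if g ∈ p.2 then [p.1] else [])) = [] := by
      intro g hg
      rw [PySem.Set.mem_update] at hg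
      push Not at hg
      simp [hg.2, hF g hg.1]
    have := ih (fun q hq => hnd q (List.mem_cons_of_mem p hq))
      (p.2.foldl (fun m g => m.modify g [] (fun ns => ns ++ [p.1])) m)
      (PySem.Set.update s p.2) (fun g => F g ++ (if g ∈ p.2 then [p.1] else [])) hs1 hm1 hF1
    simp only [List.foldl_cons]
    rw [this, show PySem.Set.union s p.2 = PySem.Set.update s p.2 from rfl]
    apply List.map_congr_left
    intro g _
    by_cases hg : g ∈ p.2 <;> simp [pvNames, hg]

theorem pv_fold_eq (ds : List (String × List String)) :
    ∀ (gl : List String) (r : PySem.Dict (List String) (PySem.Set String)),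
    gl.foldl (fun gm gene =>
      let members := PySem.List.sorted (ds.filterMap (fun p => if gene ∈ p.2 then some p.1 else none)) (fun x => x) false
      let gm := if gm.contains members then gm else gm.insert members PySem.Set.empty
      gm.modify members PySem.Set.empty (fun s => PySem.Set.add s gene)) r
    = gl.foldl (fun r gene =>
        r.modify (PySem.List.sorted (pvNames ds gene) (fun x => x) false) PySem.Set.empty
          (fun s => PySem.Set.add s gene)) r := by
  intro gl
  induction gl with
  | nil => intro r; rfl
  | cons g rest ih =>
    intro r
    rw [List.foldl_cons, List.foldl_cons, ih]
    congr 1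
    exact pv_modify_eq r _ _

-- ===== VERDICT (by name: the statement is the Claim_ definition above) =====
theorem calculate_intersections_py_spec : Claim_equal_calculate_intersections_py := by
  intro deg_sets _ hpre
  unfold Spec_calculate_intersections_py
  simp only [calculate_intersections_py, calculate_intersections_py_alt]
  have hmem : (deg_sets.foldl (fun m p =>
        p.2.foldl (fun m g => m.modify g [] (fun ns => ns ++ [p.1])) m) PySem.Dict.empty).items
      = (deg_sets.foldl (fun s p => PySem.Set.union s p.2) PySem.Set.empty).map
          (fun g => (g, pvNames deg_sets g)) := by
    have := pv_outer deg_sets hpre PySem.Dict.empty PySem.Set.empty (fun _ => [])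
      (by simp [PySem.Set.empty]) (by simp [PySem.Set.empty, PySem.Dict.empty]) (fun _ _ => rfl)
    simpa using this
  have hall : (if deg_sets = [] then PySem.Set.empty
        else (deg_sets.map (fun p => p.2)).foldl (fun s gs => PySem.Set.union s gs) PySem.Set.empty)
      = deg_sets.foldl (fun s p => PySem.Set.union s p.2) PySem.Set.empty := by
    by_cases h : deg_sets = []
    · subst h; rfl
    · rw [if_neg h, List.foldl_map]
  rw [hall, hmem, List.foldl_map]
  exact congrArg PySem.Dict.items (pv_fold_eq deg_sets _ _)
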